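-- pv_equiv track=rewrite | github.com/verybadcoder01/python_labs_sem02_bmstu | lab_04/def_back.py | find_min_circle
-- ===== SOURCE A (Python) =====
-- import math
--
-- def dist_sq(point_a, point_b):
--     return (point_a[0] - point_b[0]) ** 2 + (point_a[1] - point_b[1]) ** 2
--
-- def find_min_circle(points):
--     min_rad = math.inf
--     best_res = (-1, -1, -1)
--     for center_ind in range(len(points)):
--         for point_b_ind in range(len(points)):
--             for point_c_ind in range(len(points)):
--                 center = points[center_ind]
--                 point_b = points[point_b_ind]
--                 point_c = points[point_c_ind]
--                 if point_b == point_c or point_c == center or point_b == center: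
--                     continue
--                 if abs(dist_sq(center, point_b) - dist_sq(center, point_c)) <= 1e-5 and dist_sq(center, point_b) < min_rad:
--                     best_res = (center_ind, point_b_ind, point_c_ind)
--                     min_rad = dist_sq(center, point_b)
--     return best_res[0], best_res[1], best_res[2]
-- ===== SOURCE B (Python) =====
-- def dist_sq(point_a, point_b):
--     return (point_a[0] - point_b[0]) ** 2 + (point_a[1] - point_b[1]) ** 2
--
-- def find_min_circle(points):
--     best_d = None
--     best = (-1, -1, -1)
--     for i, center in enumerate(points):
--         # bucket the indices of points distinct (in value) from the center by squared distance
--         pairs = [(dist_sq(center, p), j) for j, p in enumerate(points) if p != center]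
--         groups = {}
--         for d, j in pairs:
--             groups[d] = groups.get(d, []) + [j]
--         for d, idxs in groups.items():
--             if best_d is None or d < best_d:
--                 b = idxs[0]
--                 c = next((k for k in idxs if points[k] != points[b]), None)
--                 if c is not None:
--                     best_d = d
--                     best = (i, b, c)
--     return best
-- ===== Notes on version B (the rewrite author's own statement) =====
-- stated objective: faster
-- what changed: Replaces A's triple nested scan over (center, b, c) with, per center, one pass that buckets point indices by squared distance in a dict and then picks, per bucket, the lexicographically first pair of distinct-valued points, keeping the strictly smallest distance seen so far.
import Mathlib
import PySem

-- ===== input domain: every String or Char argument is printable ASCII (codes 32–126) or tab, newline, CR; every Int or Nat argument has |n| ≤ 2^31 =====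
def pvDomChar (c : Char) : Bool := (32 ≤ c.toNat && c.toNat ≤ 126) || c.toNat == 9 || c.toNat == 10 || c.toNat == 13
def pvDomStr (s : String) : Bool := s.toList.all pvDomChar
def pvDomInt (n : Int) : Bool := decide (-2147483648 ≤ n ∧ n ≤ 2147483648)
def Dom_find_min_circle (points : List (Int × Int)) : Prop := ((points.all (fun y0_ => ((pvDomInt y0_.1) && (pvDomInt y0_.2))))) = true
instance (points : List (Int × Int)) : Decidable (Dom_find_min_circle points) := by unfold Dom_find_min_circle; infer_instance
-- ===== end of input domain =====

-- B replaces A's cubic scan over (center, b, c) triples by, per center, one bucketing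
-- pass over squared distances plus a scan of the buckets (objective: faster).

-- ===== PORT A =====
-- dist_sq, shared by both Pythons
def pyDistSq (a b : Int × Int) : Int := (a.1 - b.1) ^ 2 + (a.2 - b.2) ^ 2

-- `d < min_rad` with min_rad = math.inf as `none`
def fmcLt (d : Int) : Option Int → Bool
  | none => true
  | some m => decide (d < m)

def find_min_circle (points : List (Int × Int)) : Int × Int × Int :=
  let n : Int := points.length
  let res :=
    (PySem.List.pyRange 0 n 1).foldl (fun st ci =>
      (PySem.List.pyRange 0 n 1).foldl (fun st bi =>
        (PySem.List.pyRange 0 n 1).foldl (fun st ki =>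
          let center := PySem.List.pyGetD points ci (0, 0)
          let pb := PySem.List.pyGetD points bi (0, 0)
          let pc := PySem.List.pyGetD points ki (0, 0)
          if pb = pc ∨ pc = center ∨ pb = center then st
          -- abs(db - dc) <= 1e-5 on Int-valued distances holds iff db = dc (exact)
          else if pyDistSq center pb = pyDistSq center pc ∧ fmcLt (pyDistSq center pb) st.1 = true then
            (some (pyDistSq center pb), (ci, bi, ki))
          else st) st) st)
      ((none : Option Int), ((-1 : Int), (-1 : Int), (-1 : Int)))
  res.2

-- ===== PORT B =====
def find_min_circle_alt (points : List (Int × Int)) : Int × Int × Int :=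
  let res :=
    (PySem.List.enumerate points).foldl (fun st ic =>
      let i := ic.1
      let center := ic.2
      let pairs := ((PySem.List.enumerate points).filter (fun jp => jp.2 ≠ center)).map
          (fun jp => (pyDistSq center jp.2, jp.1))
      let groups := pairs.foldl (fun g p => g.modify p.1 [] (· ++ [p.2]))
          (PySem.Dict.empty : PySem.Dict Int (List Int))
      groups.items.foldl (fun st dl =>
        if fmcLt dl.1 st.1 = true then
          let b := PySem.List.pyGetD dl.2 0 0
          match dl.2.find? (fun k => PySem.List.pyGetD points k (0, 0) ≠ PySem.List.pyGetD points b (0, 0)) with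
          | none => st
          | some c => (some dl.1, (i, b, c))
        else st) st)
      ((none : Option Int), ((-1 : Int), (-1 : Int), (-1 : Int)))
  res.2

-- ===== PRECONDITION & SPEC =====
def Spec_find_min_circle (points : List (Int × Int)) (out : Int × Int × Int) : Prop := out = find_min_circle_alt points
instance (points : List (Int × Int)) (out : Int × Int × Int) : Decidable (Spec_find_min_circle points out) := by unfold Spec_find_min_circle; infer_instance

-- ===== CLAIM (what is proved, stated in full; the proofs are below) =====
def Claim_equal_find_min_circle : Prop := ∀ (points : List (Int × Int)), Dom_find_min_circle points → Spec_find_min_circle points (find_min_circle points)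

-- ===== LEMMAS AND PROOFS =====

-- the candidate type: (squared distance, result triple)
abbrev FmCand := Int × (Int × Int × Int)
abbrev FmSt := Option Int × (Int × Int × Int)

-- one strict-improvement step of the running minimum (the shared loop body shape)
def fmStep (st : FmSt) (c : FmCand) : FmSt :=
  if fmcLt c.1 st.1 = true then (some c.1, c.2) else st

-- the first candidate attaining the minimal distance
def fmFirstMin : List FmCand → Option FmCand
  | [] => none
  | c :: r =>
    match fmFirstMin r with
    | none => some c
    | some c' => if c'.1 < c.1 then some c' else some c

def fmP (ps : List (Int × Int)) (j : Int) : Int × Int := PySem.List.pyGetD ps j (0, 0)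

-- A's per-center candidate list: all eligible (b, c) pairs in lex order
def fmCandsA (ps : List (Int × Int)) (ci : Int) : List FmCand :=
  (PySem.List.pyRange 0 ps.length 1).flatMap fun bi =>
    (PySem.List.pyRange 0 ps.length 1).flatMap fun ki =>
      if fmP ps bi = fmP ps ki ∨ fmP ps ki = fmP ps ci ∨ fmP ps bi = fmP ps ci then []
      else if pyDistSq (fmP ps ci) (fmP ps bi) = pyDistSq (fmP ps ci) (fmP ps ki) then
        [(pyDistSq (fmP ps ci) (fmP ps bi), (ci, bi, ki))]
      else []

def fmPairs (ps : List (Int × Int)) (c0 : Int × Int) : List (Int × Int) :=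
  ((PySem.List.enumerate ps).filter (fun jp => jp.2 ≠ c0)).map (fun jp => (pyDistSq c0 jp.2, jp.1))

def fmGroups (ps : List (Int × Int)) (c0 : Int × Int) : PySem.Dict Int (List Int) :=
  (fmPairs ps c0).foldl (fun g p => g.modify p.1 [] (· ++ [p.2])) PySem.Dict.empty

-- B's per-center candidate list: at most one candidate per bucket
def fmCandsB (ps : List (Int × Int)) (i : Int) (c0 : Int × Int) : List FmCand :=
  (fmGroups ps c0).items.flatMap fun dl =>
    match dl.2.find? (fun k => fmP ps k ≠ fmP ps (PySem.List.pyGetD dl.2 0 0)) with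
    | none => []
    | some c => [(dl.1, (i, PySem.List.pyGetD dl.2 0 0, c))]

-- the members of bucket d
def fmM (ps : List (Int × Int)) (c0 : Int × Int) (d : Int) : List Int :=
  ((fmPairs ps c0).filter (fun p => p.1 == d)).map (·.2)

-- eligibility of a pair of indices for center value c0
def fmEligP (ps : List (Int × Int)) (c0 : Int × Int) (bi ki : Int) : Prop :=
  0 ≤ bi ∧ bi < (ps.length : Int) ∧ 0 ≤ ki ∧ ki < (ps.length : Int) ∧
    fmP ps bi ≠ fmP ps ki ∧ fmP ps ki ≠ c0 ∧ fmP ps bi ≠ c0 ∧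
    pyDistSq c0 (fmP ps bi) = pyDistSq c0 (fmP ps ki)

def fmRlex (x y : FmCand) : Prop :=
  x.2.2.1 < y.2.2.1 ∨ (x.2.2.1 = y.2.2.1 ∧ x.2.2.2 < y.2.2.2)

lemma foldl_congr_fun {α β : Type} (l : List α) (f g : β → α → β) (st : β)
    (h : ∀ b a, f b a = g b a) : l.foldl f st = l.foldl g st := by
  have hfg : f = g := funext fun b => funext (h b)
  rw [hfg]

lemma foldl_fmStep_eq (l : List FmCand) (st : FmSt) :
    l.foldl fmStep st = match fmFirstMin l with | none => st | some c => fmStep st c := by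
  induction l generalizing st with
  | nil => simp [fmFirstMin]
  | cons c r ih =>
    have hstep : ∀ (st : FmSt) (c c' : FmCand),
        fmStep (fmStep st c) c' = fmStep st (if c'.1 < c.1 then c' else c) := by
      intro st c c'
      rcases st with ⟨m, b⟩
      cases m <;> simp only [fmStep, fmcLt] <;> split_ifs <;> simp_all <;> omega
    simp only [List.foldl_cons, ih]
    cases h : fmFirstMin r with
    | none => simp [fmFirstMin, h]
    | some c' =>
      simp only [fmFirstMin, h]
      rw [hstep]
      split_ifs <;> simp


lemma fmFirstMin_eq_none (l : List FmCand) : fmFirstMin l = none ↔ l = [] := by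
  cases l with
  | nil => simp [fmFirstMin]
  | cons c r =>
    simp only [fmFirstMin]
    cases h : fmFirstMin r with
    | none => simp
    | some c' => simp; split_ifs <;> simp


lemma fmFirstMin_eq_some_iff {R : FmCand → FmCand → Prop}
    (hR : ∀ a b, R a b → a.1 = b.1 → ¬(a = b ∨ R b a))
    {l : List FmCand} (hl : l.Pairwise R) (w : FmCand) :
    fmFirstMin l = some w ↔
      w ∈ l ∧ (∀ x ∈ l, w.1 ≤ x.1) ∧ (∀ x ∈ l, x.1 = w.1 → x = w ∨ R w x) := by
  revert hl
  induction l generalizing w with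
  | nil => intro hl; simp [fmFirstMin]
  | cons c r ih =>
    intro hl
    rcases List.pairwise_cons.mp hl with ⟨hc, hr⟩
    simp only [fmFirstMin]
    cases h : fmFirstMin r with
    | none =>
      have hr0 : r = [] := (fmFirstMin_eq_none r).mp h
      subst hr0
      constructor
      · intro hw
        have : c = w := by injection hw
        subst this
        exact ⟨List.mem_singleton_self c,
          by intro x hx; rw [List.mem_singleton.mp hx],
          by intro x hx _; exact Or.inl (List.mem_singleton.mp hx)⟩
      · rintro ⟨hmem, -, -⟩
        rw [List.mem_singleton.mp hmem]
    | some c' =>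
      obtain ⟨hmem', hmin', hfirst'⟩ := (ih c' hr).mp h
      by_cases hlt : c'.1 < c.1
      · simp only [hlt, if_pos, Option.some_inj]
        constructor
        · rintro rfl
          refine ⟨List.mem_cons_of_mem _ hmem', ?_, ?_⟩
          · intro x hx
            rcases List.mem_cons.mp hx with rfl | hx
            · omega
            · exact hmin' x hx
          · intro x hx hxw
            rcases List.mem_cons.mp hx with rfl | hx
            · omega
            · exact hfirst' x hx hxw
        · rintro ⟨hmem, hmin, hfirst⟩
          rcases List.mem_cons.mp hmem with rfl | hwr
          · have := hmin c' (List.mem_cons_of_mem _ hmem')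
            omega
          · have : fmFirstMin r = some w := (ih w hr).mpr
              ⟨hwr, fun x hx => hmin x (List.mem_cons_of_mem _ hx),
                fun x hx hxw => hfirst x (List.mem_cons_of_mem _ hx) hxw⟩
            rw [h] at this
            injection this
      · simp only [hlt, if_false, Option.some_inj]
        constructor
        · rintro rfl
          refine ⟨List.mem_cons_self, ?_, ?_⟩
          · intro x hx
            rcases List.mem_cons.mp hx with rfl | hx
            · omega
            · have := hmin' x hx
              omega
          · intro x hx hxw
            rcases List.mem_cons.mp hx with rfl | hx
            · exact Or.inl rfl
            · exact Or.inr (hc x hx)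
        · rintro ⟨hmem, hmin, hfirst⟩
          rcases List.mem_cons.mp hmem with rfl | hwr
          · rfl
          · have hw : fmFirstMin r = some w := (ih w hr).mpr
              ⟨hwr, fun x hx => hmin x (List.mem_cons_of_mem _ hx),
                fun x hx hxw => hfirst x (List.mem_cons_of_mem _ hx) hxw⟩
            rw [h] at hw
            have hcw : c' = w := by injection hw
            subst hcw
            have h1 : c'.1 = c.1 := by
              have := hmin c List.mem_cons_self
              omega
            rcases hfirst c List.mem_cons_self h1.symm with rfl | hRc
            · rfl
            · exact absurd (Or.inr hRc) (hR c c' (hc c' hwr) h1.symm)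

lemma enumerate_eq_map (xs : List (Int × Int)) (s : Int) :
    PySem.List.enumerate xs s =
      (PySem.List.pyRange s (s + xs.length) 1).map
        (fun j => (j, PySem.List.pyGetD xs (j - s) (0, 0))) := by
  induction xs generalizing s with
  | nil => simp [PySem.List.enumerate_nil]
  | cons x xs ih =>
    rw [PySem.List.enumerate_cons, ih]
    have hlt : s < s + ((x :: xs).length : Int) := by
      simp only [List.length_cons]; push_cast; omega
    rw [PySem.List.pyRange_one_cons hlt]
    simp only [List.map_cons]
    congr 1
    · simp
    · have he : s + ((x :: xs).length : Int) = (s + 1) + (xs.length : Int) := by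
        simp only [List.length_cons]; push_cast; omega
      rw [he]
      apply List.map_congr_left
      intro j hj
      rw [PySem.List.mem_pyRange_one] at hj
      have hlen : (0:Int) ≤ xs.length := by positivity
      have h1 : (0:Int) ≤ j - (s+1) := by omega
      have h2 : j - (s+1) < (xs.length : Int) := by omega
      have h3 : (0:Int) ≤ j - s := by omega
      have h4 : j - s < ((x :: xs).length : Int) := by
        simp only [List.length_cons]; push_cast; omega
      rw [PySem.List.pyGetD_eq_getElem _ _ h1 h2, PySem.List.pyGetD_eq_getElem _ _ h3 h4]
      have h5 : (j - s).toNat = (j - (s+1)).toNat + 1 := by omega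
      simp [h5]


lemma enumerate_zero_eq (xs : List (Int × Int)) :
    PySem.List.enumerate xs =
      (PySem.List.pyRange 0 xs.length 1).map (fun j => (j, fmP xs j)) := by
  rw [show PySem.List.enumerate xs = PySem.List.enumerate xs 0 from rfl, enumerate_eq_map]
  simp [fmP]

lemma portA_eq (ps : List (Int × Int)) :
    find_min_circle ps =
      (((PySem.List.pyRange 0 ps.length 1).flatMap (fmCandsA ps)).foldl fmStep
        (none, (-1, -1, -1))).2 := by
  unfold find_min_circle
  dsimp only
  rw [List.foldl_flatMap]
  congr 1
  apply foldl_congr_fun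
  intro st ci
  unfold fmCandsA
  rw [List.foldl_flatMap]
  apply foldl_congr_fun
  intro st bi
  rw [List.foldl_flatMap]
  apply foldl_congr_fun
  intro st ki
  simp only [fmP]
  by_cases h1 : PySem.List.pyGetD ps bi (0,0) = PySem.List.pyGetD ps ki (0,0) ∨
      PySem.List.pyGetD ps ki (0,0) = PySem.List.pyGetD ps ci (0,0) ∨
      PySem.List.pyGetD ps bi (0,0) = PySem.List.pyGetD ps ci (0,0)
  · simp [h1]
  · by_cases h2 : pyDistSq (PySem.List.pyGetD ps ci (0,0)) (PySem.List.pyGetD ps bi (0,0)) =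
        pyDistSq (PySem.List.pyGetD ps ci (0,0)) (PySem.List.pyGetD ps ki (0,0))
    · by_cases h3 : fmcLt (pyDistSq (PySem.List.pyGetD ps ci (0,0)) (PySem.List.pyGetD ps bi (0,0))) st.1 = true
      · simp [h1, h2, fmStep]
      · simp [h1, h2, fmStep]
    · simp [h1, h2]

lemma portB_eq (ps : List (Int × Int)) :
    find_min_circle_alt ps =
      (((PySem.List.pyRange 0 ps.length 1).flatMap
          (fun ci => fmCandsB ps ci (fmP ps ci))).foldl fmStep (none, (-1, -1, -1))).2 := by
  unfold find_min_circle_alt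
  unfold fmCandsB fmGroups fmPairs
  dsimp only
  rw [enumerate_zero_eq, List.foldl_map, List.foldl_flatMap]
  congr 1
  apply foldl_congr_fun
  intro st ci
  dsimp only
  rw [List.foldl_flatMap]
  apply foldl_congr_fun
  intro st dl
  simp only [fmP, ne_eq, decide_not]
  by_cases h3 : fmcLt dl.1 st.1 = true
  · cases hf : dl.2.find? (fun k =>
        !decide (PySem.List.pyGetD ps k (0,0) = PySem.List.pyGetD ps (PySem.List.pyGetD dl.2 0 0) (0,0))) with
    | none => simp [h3]
    | some c => simp [h3, fmStep]
  · cases hf : dl.2.find? (fun k =>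
        !decide (PySem.List.pyGetD ps k (0,0) = PySem.List.pyGetD ps (PySem.List.pyGetD dl.2 0 0) (0,0))) with
    | none => simp [h3]
    | some c => simp [h3, fmStep]

lemma mem_fmPairs (ps : List (Int × Int)) (c0 : Int × Int) (x : Int × Int) :
    x ∈ fmPairs ps c0 ↔
      0 ≤ x.2 ∧ x.2 < (ps.length : Int) ∧ fmP ps x.2 ≠ c0 ∧
        x.1 = pyDistSq c0 (fmP ps x.2) := by
  unfold fmPairs
  rw [enumerate_zero_eq]
  rcases x with ⟨d, j⟩
  simp only [List.mem_map, List.mem_filter, PySem.List.mem_pyRange_one, Prod.mk.injEq,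
    decide_eq_true_eq]
  constructor
  · rintro ⟨a, ⟨⟨j', ⟨hr, rfl⟩⟩, hpred⟩, hd, hj⟩
    subst hd; subst hj
    exact ⟨hr.1, hr.2, by simpa using hpred, rfl⟩
  · rintro ⟨h0, h1, hne, rfl⟩
    exact ⟨(j, fmP ps j), ⟨⟨j, ⟨⟨h0, h1⟩, rfl⟩⟩, by simpa using hne⟩, rfl, rfl⟩

lemma fmGroups_getD (ps : List (Int × Int)) (c0 : Int × Int) (d : Int) :
    (fmGroups ps c0).getD d [] = fmM ps c0 d := by
  unfold fmGroups fmM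
  rw [PySem.Dict.getD_foldl_modify_append]
  simp

lemma fmGroups_keys_nodup (ps : List (Int × Int)) (c0 : Int × Int) :
    (fmGroups ps c0).keys.Nodup := by
  unfold fmGroups
  exact PySem.Dict.nodup_keys_foldl_modify_key _ _ _ _ _ PySem.Dict.nodup_keys_empty

lemma fmGroups_items (ps : List (Int × Int)) (c0 : Int × Int) :
    (fmGroups ps c0).items = (fmGroups ps c0).keys.map (fun d => (d, fmM ps c0 d)) := by
  rw [PySem.Dict.items_eq_map_keys _ (fmGroups_keys_nodup ps c0) []]
  apply List.map_congr_left
  intro d _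
  rw [fmGroups_getD]

lemma mem_fmGroups_keys (ps : List (Int × Int)) (c0 : Int × Int) (d : Int) :
    d ∈ (fmGroups ps c0).keys ↔ ∃ j, (d, j) ∈ fmPairs ps c0 := by
  unfold fmGroups
  rw [PySem.Dict.keys_foldl_modify_key]
  simp only [PySem.Dict.keys_empty, PySem.Set.update_nil_left, PySem.Set.mem_ofList,
    List.mem_map]
  constructor
  · rintro ⟨⟨d', j⟩, hp, rfl⟩
    exact ⟨j, hp⟩
  · rintro ⟨j, hj⟩
    exact ⟨(d, j), hj, rfl⟩

lemma mem_fmM (ps : List (Int × Int)) (c0 : Int × Int) (d j : Int) :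
    j ∈ fmM ps c0 d ↔
      0 ≤ j ∧ j < (ps.length : Int) ∧ fmP ps j ≠ c0 ∧ pyDistSq c0 (fmP ps j) = d := by
  unfold fmM
  simp only [List.mem_map, List.mem_filter, beq_iff_eq]
  constructor
  · rintro ⟨⟨d', j'⟩, ⟨hp, hd⟩, rfl⟩
    obtain ⟨h0, h1, hne, h4⟩ := (mem_fmPairs ps c0 _).mp hp
    dsimp only at h0 h1 hne h4 hd ⊢
    subst hd
    exact ⟨h0, h1, hne, h4.symm⟩
  · rintro ⟨h0, h1, hne, rfl⟩
    exact ⟨(pyDistSq c0 (fmP ps j), j), ⟨(mem_fmPairs ps c0 _).mpr ⟨h0, h1, hne, rfl⟩, rfl⟩, rfl⟩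

lemma fmM_sorted (ps : List (Int × Int)) (c0 : Int × Int) (d : Int) :
    (fmM ps c0 d).Pairwise (· < ·) := by
  unfold fmM fmPairs
  rw [enumerate_zero_eq]
  rw [List.pairwise_map]
  apply List.Pairwise.filter
  rw [List.pairwise_map]
  apply List.Pairwise.filter
  rw [List.pairwise_map]
  simpa using PySem.List.pairwise_lt_pyRange_one 0 (ps.length : Int)

lemma mem_fmCandsA (ps : List (Int × Int)) (ci : Int) (x : FmCand) :
    x ∈ fmCandsA ps ci ↔
      ∃ bi ki, fmEligP ps (fmP ps ci) bi ki ∧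
        x = (pyDistSq (fmP ps ci) (fmP ps bi), (ci, bi, ki)) := by
  unfold fmCandsA fmEligP
  simp only [List.mem_flatMap, PySem.List.mem_pyRange_one]
  constructor
  · rintro ⟨bi, ⟨hb0, hb1⟩, ki, ⟨hk0, hk1⟩, hx⟩
    split_ifs at hx with h1 h2
    · simp at hx
    · simp only [List.mem_singleton] at hx
      push Not at h1
      exact ⟨bi, ki, ⟨hb0, hb1, hk0, hk1, h1.1, h1.2.1, h1.2.2, h2⟩, hx⟩
    · simp at hx
  · rintro ⟨bi, ki, ⟨hb0, hb1, hk0, hk1, hne1, hne2, hne3, hdeq⟩, rfl⟩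
    refine ⟨bi, ⟨hb0, hb1⟩, ki, ⟨hk0, hk1⟩, ?_⟩
    rw [if_neg (by tauto), if_pos hdeq]
    simp

lemma pairwise_fmCandsA (ps : List (Int × Int)) (ci : Int) :
    (fmCandsA ps ci).Pairwise fmRlex := by
  unfold fmCandsA
  rw [List.pairwise_flatMap]
  refine ⟨?_, ?_⟩
  · intro bi _
    rw [List.pairwise_flatMap]
    refine ⟨?_, ?_⟩
    · intro ki _
      split_ifs <;> simp
    · refine List.Pairwise.imp ?_ (PySem.List.pairwise_lt_pyRange_one 0 (ps.length : Int))
      intro a b hab x hx y hy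
      split_ifs at hx <;> simp only [List.mem_singleton, List.not_mem_nil] at hx
      split_ifs at hy <;> simp only [List.mem_singleton, List.not_mem_nil] at hy
      subst hx; subst hy
      exact Or.inr ⟨rfl, hab⟩
  · refine List.Pairwise.imp ?_ (PySem.List.pairwise_lt_pyRange_one 0 (ps.length : Int))
    intro a b hab x hx y hy
    simp only [List.mem_flatMap] at hx hy
    obtain ⟨ka, -, hx⟩ := hx
    obtain ⟨kb, -, hy⟩ := hy
    split_ifs at hx <;> simp only [List.mem_singleton, List.not_mem_nil] at hx
    split_ifs at hy <;> simp only [List.mem_singleton, List.not_mem_nil] at hy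
    subst hx; subst hy
    exact Or.inl hab

lemma mem_fmCandsB (ps : List (Int × Int)) (ci : Int) (c0 : Int × Int) (x : FmCand) :
    x ∈ fmCandsB ps ci c0 ↔
      ∃ d c, d ∈ (fmGroups ps c0).keys ∧
        (fmM ps c0 d).find?
          (fun k => fmP ps k ≠ fmP ps (PySem.List.pyGetD (fmM ps c0 d) 0 0)) = some c ∧
        x = (d, (ci, PySem.List.pyGetD (fmM ps c0 d) 0 0, c)) := by
  unfold fmCandsB
  rw [fmGroups_items]
  simp only [List.mem_flatMap, List.mem_map]
  constructor
  · rintro ⟨dl, ⟨d, hd, rfl⟩, hx⟩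
    dsimp only at hx
    cases hf : (fmM ps c0 d).find?
        (fun k => decide (fmP ps k ≠ fmP ps (PySem.List.pyGetD (fmM ps c0 d) 0 0))) with
    | none => rw [hf] at hx; simp at hx
    | some c =>
      rw [hf] at hx
      simp only [List.mem_singleton] at hx
      exact ⟨d, c, hd, hf, hx⟩
  · rintro ⟨d, c, hd, hf, rfl⟩
    refine ⟨(d, fmM ps c0 d), ⟨d, hd, rfl⟩, ?_⟩
    dsimp only
    rw [hf]
    simp

lemma pairwise_fmCandsB (ps : List (Int × Int)) (ci : Int) (c0 : Int × Int) :
    (fmCandsB ps ci c0).Pairwise (fun x y => x.1 ≠ y.1) := by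
  have hkey : ∀ dl : Int × List Int, ∀ x : FmCand,
      x ∈ (match dl.2.find? (fun k => decide (fmP ps k ≠ fmP ps (PySem.List.pyGetD dl.2 0 0))) with
        | none => ([] : List FmCand)
        | some c => [(dl.1, (ci, PySem.List.pyGetD dl.2 0 0, c))]) → x.1 = dl.1 := by
    intro dl x hx
    cases hf : dl.2.find? (fun k => decide (fmP ps k ≠ fmP ps (PySem.List.pyGetD dl.2 0 0))) with
    | none => rw [hf] at hx; simp at hx
    | some c => rw [hf] at hx; simp only [List.mem_singleton] at hx; rw [hx]
  have hitems : (fmGroups ps c0).items.Pairwise (fun a b => a.1 ≠ b.1) := by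
    rw [fmGroups_items, List.pairwise_map]
    simpa using fmGroups_keys_nodup ps c0
  unfold fmCandsB
  rw [List.pairwise_flatMap]
  refine ⟨?_, ?_⟩
  · intro dl _
    cases hf : dl.2.find? (fun k => decide (fmP ps k ≠ fmP ps (PySem.List.pyGetD dl.2 0 0))) <;>
      simp
  · refine List.Pairwise.imp ?_ hitems
    intro a b hab x hx y hy
    rw [hkey a x hx, hkey b y hy]
    exact hab

lemma fmCandsB_to_A (ps : List (Int × Int)) (ci : Int) (x : FmCand)
    (hx : x ∈ fmCandsB ps ci (fmP ps ci)) :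
    ∃ x', x' ∈ fmCandsA ps ci ∧ x'.1 = x.1 := by
  obtain ⟨d, c, hd, hf, rfl⟩ := (mem_fmCandsB ps ci (fmP ps ci) x).mp hx
  have hc_mem : c ∈ fmM ps (fmP ps ci) d := List.mem_of_find?_eq_some hf
  have hc_pred := List.find?_some hf
  simp only [decide_eq_true_eq] at hc_pred
  cases hM : fmM ps (fmP ps ci) d with
  | nil => rw [hM] at hc_mem; simp at hc_mem
  | cons m r =>
    have hhead : PySem.List.pyGetD (fmM ps (fmP ps ci) d) 0 0 = m := by
      rw [hM]; exact PySem.List.pyGetD_zero_cons m r 0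
    have hm_mem : m ∈ fmM ps (fmP ps ci) d := by rw [hM]; exact List.mem_cons_self
    obtain ⟨hm0, hm1, hmc, hmd⟩ := (mem_fmM ps (fmP ps ci) d m).mp hm_mem
    obtain ⟨hc0', hc1, hcc, hcd⟩ := (mem_fmM ps (fmP ps ci) d c).mp hc_mem
    rw [hhead] at hc_pred
    refine ⟨(pyDistSq (fmP ps ci) (fmP ps m), (ci, m, c)), ?_, ?_⟩
    · exact (mem_fmCandsA ps ci _).mpr ⟨m, c,
        ⟨hm0, hm1, hc0', hc1, fun h => hc_pred h.symm, hcc, hmc, hmd.trans hcd.symm⟩, rfl⟩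
    · exact hmd

lemma center_eq (ps : List (Int × Int)) (ci : Int) :
    fmFirstMin (fmCandsA ps ci) = fmFirstMin (fmCandsB ps ci (fmP ps ci)) := by
  by_cases hE : ∃ bi ki, fmEligP ps (fmP ps ci) bi ki
  case neg =>
    have hA : fmCandsA ps ci = [] := by
      rw [List.eq_nil_iff_forall_not_mem]
      intro x hx
      obtain ⟨bi, ki, helig, -⟩ := (mem_fmCandsA ps ci x).mp hx
      exact hE ⟨bi, ki, helig⟩
    have hB : fmCandsB ps ci (fmP ps ci) = [] := by
      rw [List.eq_nil_iff_forall_not_mem]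
      intro x hx
      obtain ⟨x', hx', -⟩ := fmCandsB_to_A ps ci x hx
      obtain ⟨bi, ki, helig, -⟩ := (mem_fmCandsA ps ci x').mp hx'
      exact hE ⟨bi, ki, helig⟩
    rw [hA, hB]
  case pos =>
    obtain ⟨bi0, ki0, he0⟩ := hE
    have hAne : fmCandsA ps ci ≠ [] := by
      intro h
      have hmem : (pyDistSq (fmP ps ci) (fmP ps bi0), (ci, bi0, ki0)) ∈ fmCandsA ps ci :=
        (mem_fmCandsA ps ci _).mpr ⟨bi0, ki0, he0, rfl⟩
      rw [h] at hmem
      simp at hmem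
    obtain ⟨w, hw⟩ : ∃ w, fmFirstMin (fmCandsA ps ci) = some w := by
      cases h : fmFirstMin (fmCandsA ps ci) with
      | none => exact absurd ((fmFirstMin_eq_none _).mp h) hAne
      | some w => exact ⟨w, rfl⟩
    have hRlexOK : ∀ a b : FmCand, fmRlex a b → a.1 = b.1 → ¬(a = b ∨ fmRlex b a) := by
      rintro a b hab - (rfl | hba)
      · unfold fmRlex at hab; omega
      · unfold fmRlex at hab hba; omega
    have hNeOK : ∀ a b : FmCand, a.1 ≠ b.1 → a.1 = b.1 → ¬(a = b ∨ b.1 ≠ a.1) := by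
      intro a b hab h
      exact absurd h hab
    obtain ⟨hw1, hw2, hw3⟩ :=
      (fmFirstMin_eq_some_iff hRlexOK (pairwise_fmCandsA ps ci) w).mp hw
    obtain ⟨bi, ki, helig, hwx⟩ := (mem_fmCandsA ps ci w).mp hw1
    obtain ⟨hb0, hb1, hk0, hk1, hbk, hkc, hbc, hdd⟩ := helig
    subst hwx
    have hdkeys : pyDistSq (fmP ps ci) (fmP ps bi) ∈ (fmGroups ps (fmP ps ci)).keys :=
      (mem_fmGroups_keys ps (fmP ps ci) _).mpr
        ⟨bi, (mem_fmPairs ps (fmP ps ci) _).mpr ⟨hb0, hb1, hbc, rfl⟩⟩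
    have hbiM : bi ∈ fmM ps (fmP ps ci) (pyDistSq (fmP ps ci) (fmP ps bi)) :=
      (mem_fmM ps (fmP ps ci) _ bi).mpr ⟨hb0, hb1, hbc, rfl⟩
    have hkiM : ki ∈ fmM ps (fmP ps ci) (pyDistSq (fmP ps ci) (fmP ps bi)) :=
      (mem_fmM ps (fmP ps ci) _ ki).mpr ⟨hk0, hk1, hkc, hdd.symm⟩
    cases hM : fmM ps (fmP ps ci) (pyDistSq (fmP ps ci) (fmP ps bi)) with
    | nil => rw [hM] at hbiM; simp at hbiM
    | cons m r =>
      have hhead : PySem.List.pyGetD (fmM ps (fmP ps ci) (pyDistSq (fmP ps ci) (fmP ps bi))) 0 0 = m := by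
        rw [hM]; exact PySem.List.pyGetD_zero_cons m r 0
      have hm_mem : m ∈ fmM ps (fmP ps ci) (pyDistSq (fmP ps ci) (fmP ps bi)) := by
        rw [hM]; exact List.mem_cons_self
      obtain ⟨hm0, hm1, hmc, hmd⟩ := (mem_fmM ps (fmP ps ci) _ m).mp hm_mem
      have hm_le : ∀ j ∈ fmM ps (fmP ps ci) (pyDistSq (fmP ps ci) (fmP ps bi)), m ≤ j := by
        have hs := fmM_sorted ps (fmP ps ci) (pyDistSq (fmP ps ci) (fmP ps bi))
        rw [hM] at hs
        intro j hj
        rw [hM] at hj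
        rcases List.mem_cons.mp hj with rfl | hj
        · exact le_refl j
        · exact le_of_lt ((List.pairwise_cons.mp hs).1 j hj)
      -- the head of the bucket is bi, the lexicographically first eligible b-index
      have hmbi : m = bi := by
        by_contra hne
        have hm_lt : m < bi := lt_of_le_of_ne (hm_le bi hbiM) hne
        by_cases hpm : fmP ps m = fmP ps bi
        · have hx'mem : (pyDistSq (fmP ps ci) (fmP ps m), (ci, m, ki)) ∈ fmCandsA ps ci :=
            (mem_fmCandsA ps ci _).mpr ⟨m, ki,
              ⟨hm0, hm1, hk0, hk1, by rw [hpm]; exact hbk, hkc, hmc, hmd.trans hdd⟩, rfl⟩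
          rcases hw3 _ hx'mem hmd with heq | hlex
          · have : m = bi := by
              have := congrArg (fun z : FmCand => z.2.2.1) heq
              simpa using this
            exact hne this
          · unfold fmRlex at hlex
            simp only at hlex
            omega
        · have hx'mem : (pyDistSq (fmP ps ci) (fmP ps m), (ci, m, bi)) ∈ fmCandsA ps ci :=
            (mem_fmCandsA ps ci _).mpr ⟨m, bi,
              ⟨hm0, hm1, hb0, hb1, hpm, hbc, hmc, hmd⟩, rfl⟩
          rcases hw3 _ hx'mem hmd with heq | hlex
          · have : m = bi := by
              have := congrArg (fun z : FmCand => z.2.2.1) heq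
              simpa using this
            exact hne this
          · unfold fmRlex at hlex
            simp only at hlex
            omega
      subst hmbi
      -- the bucket's find? hits exactly ki
      cases hf : (fmM ps (fmP ps ci) (pyDistSq (fmP ps ci) (fmP ps m))).find?
          (fun k => decide (fmP ps k ≠ fmP ps (PySem.List.pyGetD
            (fmM ps (fmP ps ci) (pyDistSq (fmP ps ci) (fmP ps m))) 0 0))) with
      | none =>
        exfalso
        have := List.find?_eq_none.mp hf ki hkiM
        rw [hhead] at this
        simp only [decide_eq_true_eq] at this
        exact this (Ne.symm hbk)
      | some c =>
        have hc_mem : c ∈ fmM ps (fmP ps ci) (pyDistSq (fmP ps ci) (fmP ps m)) :=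
          List.mem_of_find?_eq_some hf
        have hc_pred := List.find?_some hf
        rw [hhead] at hc_pred
        simp only [decide_eq_true_eq] at hc_pred
        obtain ⟨hcb0, hcb1, hccc, hcdd⟩ := (mem_fmM ps (fmP ps ci) _ c).mp hc_mem
        have hcki : c = ki := by
          have hx''mem : (pyDistSq (fmP ps ci) (fmP ps m), (ci, m, c)) ∈ fmCandsA ps ci :=
            (mem_fmCandsA ps ci _).mpr ⟨m, c,
              ⟨hm0, hm1, hcb0, hcb1, fun h => hc_pred h.symm, hccc, hmc, hcdd.symm⟩, rfl⟩
          rcases hw3 _ hx''mem rfl with heq | hlex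
          · have := congrArg (fun z : FmCand => z.2.2.2) heq
            simpa using this
          · exfalso
            unfold fmRlex at hlex
            simp only at hlex
            -- hlex : m < m ∨ (m = m ∧ ki < c); show c ≤ ki for contradiction
            obtain ⟨as, bs, hsplit, hfail⟩ := (List.find?_eq_some_iff_append.mp hf).2
            have hki_pred : fmP ps ki ≠ fmP ps m := Ne.symm hbk
            have hki_not_as : ki ∉ as := by
              intro hin
              have := hfail ki hin
              rw [hhead] at this
              simp only [Bool.not_eq_true', decide_eq_false_iff_not, not_not] at this
              exact hki_pred this
            have hki_cb : ki ∈ c :: bs := by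
              have := hkiM
              rw [hsplit] at this
              rcases List.mem_append.mp this with h | h
              · exact absurd h hki_not_as
              · exact h
            rcases List.mem_cons.mp hki_cb with rfl | hki_bs
            · omega
            · have hs := fmM_sorted ps (fmP ps ci) (pyDistSq (fmP ps ci) (fmP ps m))
              rw [hsplit] at hs
              have := (List.pairwise_cons.mp (List.pairwise_append.mp hs).2.1).1 ki hki_bs
              omega
        subst hcki
        rw [hw]
        symm
        refine (fmFirstMin_eq_some_iff hNeOK (pairwise_fmCandsB ps ci (fmP ps ci)) _).mpr
          ⟨?_, ?_, ?_⟩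
        · exact (mem_fmCandsB ps ci (fmP ps ci) _).mpr
            ⟨pyDistSq (fmP ps ci) (fmP ps m), c, hdkeys, hf, by rw [hhead]⟩
        · intro x hx
          obtain ⟨x', hx', hx1⟩ := fmCandsB_to_A ps ci x hx
          rw [← hx1]
          exact hw2 x' hx'
        · intro x hx hx1
          obtain ⟨d', c', hd', hf', rfl⟩ := (mem_fmCandsB ps ci (fmP ps ci) x).mp hx
          dsimp only at hx1
          subst hx1
          have : c' = c := by
            rw [hf] at hf'
            injection hf' with h
            exact h.symm
          subst this
          exact Or.inl (by rw [hhead])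

-- ===== VERDICT (by name: the statement is the Claim_ definition above) =====
theorem find_min_circle_spec : Claim_equal_find_min_circle := by
  intro ps _
  show find_min_circle ps = find_min_circle_alt ps
  rw [portA_eq, portB_eq, List.foldl_flatMap, List.foldl_flatMap]
  congr 1
  apply foldl_congr_fun
  intro st ci
  rw [foldl_fmStep_eq, foldl_fmStep_eq, center_eq]
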